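-- pv_equiv track=rewrite | github.com/troyma2004/ThirdYearProject | src/create_corpus.py | split_formulas
-- ===== SOURCE A (Python) =====
-- from typing import Dict, Iterable, List, Tuple
--
-- AXIOM_LIKE = {
--     "axiom",
--     "hypothesis",
--     "definition",
--     "assumption",
--     "lemma",
--     "theorem",
--     "corollary",
--     "conjecture",
--     "negated_conjecture",
-- }
--
-- def split_formulas(
--     all_formulas: Dict[str, Dict[str, str]],
--     positive_axiom_names: Iterable[str],
-- ) -> Tuple[List[Dict[str, str]], List[Dict[str, str]], List[Dict[str, str]], List[Dict[str, str]], List[Dict[str, str]]]: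
--     """
--     Split parsed formulas into output buckets.
--     """
--     positive_name_set = set(positive_axiom_names)
--     conjecture: List[Dict[str, str]] = []
--     negated_conjecture: List[Dict[str, str]] = []
--     positives: List[Dict[str, str]] = []
--     negatives: List[Dict[str, str]] = []
--     always_include: List[Dict[str, str]] = []
--
--     for name, data in all_formulas.items():
--         role = data["role"]
--
--         if role not in AXIOM_LIKE:
--             always_include.append(data)
--             continue
--
--         if role == "conjecture":
--             conjecture.append(data)
--         elif role == "negated_conjecture":
--             negated_conjecture.append(data)
--         elif name in positive_name_set:
--             positives.append(data)
--         else: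
--             negatives.append(data)
--
--     return conjecture, negated_conjecture, positives, negatives, always_include
-- ===== SOURCE B (Python) =====
-- from typing import Dict, Iterable, List, Tuple
--
-- AXIOM_LIKE = {
--     "axiom",
--     "hypothesis",
--     "definition",
--     "assumption",
--     "lemma",
--     "theorem",
--     "corollary",
--     "conjecture",
--     "negated_conjecture",
-- }
--
-- def split_formulas(all_formulas, positive_axiom_names):
--     """Split parsed formulas into output buckets: one independent filtering
--     pass per bucket, preserving dict iteration order."""
--     pos = set(positive_axiom_names)
--     items = list(all_formulas.items())
--     conjecture = [d for _, d in items if d["role"] == "conjecture"]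
--     negated_conjecture = [d for _, d in items if d["role"] == "negated_conjecture"]
--     positives = [d for n, d in items
--                  if d["role"] in AXIOM_LIKE
--                  and d["role"] not in ("conjecture", "negated_conjecture")
--                  and n in pos]
--     negatives = [d for n, d in items
--                  if d["role"] in AXIOM_LIKE
--                  and d["role"] not in ("conjecture", "negated_conjecture")
--                  and n not in pos]
--     always_include = [d for _, d in items if d["role"] not in AXIOM_LIKE]
--     return conjecture, negated_conjecture, positives, negatives, always_include
-- ===== Notes on version B (the rewrite author's own statement) =====
-- stated objective: alternative
-- what changed: Replaces the single branching elif loop by five independent filtering passes over the items, one per bucket, each with an explicit closed predicate reproducing the elif mutual exclusion.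
-- outside the precondition, e.g. on split_formulas({'f': {'kind': 'axiom'}}, []): A raises KeyError, B raises KeyError
import Mathlib
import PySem

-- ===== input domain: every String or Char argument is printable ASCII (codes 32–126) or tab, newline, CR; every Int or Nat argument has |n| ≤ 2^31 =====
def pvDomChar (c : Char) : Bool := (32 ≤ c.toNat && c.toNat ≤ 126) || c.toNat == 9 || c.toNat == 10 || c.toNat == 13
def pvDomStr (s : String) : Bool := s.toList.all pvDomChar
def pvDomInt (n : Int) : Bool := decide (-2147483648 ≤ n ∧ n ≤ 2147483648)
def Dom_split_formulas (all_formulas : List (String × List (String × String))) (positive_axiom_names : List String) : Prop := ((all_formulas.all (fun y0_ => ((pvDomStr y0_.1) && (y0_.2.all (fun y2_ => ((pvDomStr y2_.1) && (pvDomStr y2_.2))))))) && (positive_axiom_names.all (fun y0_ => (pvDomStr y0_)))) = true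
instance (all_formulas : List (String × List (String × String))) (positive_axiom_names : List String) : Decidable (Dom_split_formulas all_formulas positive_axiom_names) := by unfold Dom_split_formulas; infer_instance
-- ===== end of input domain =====

-- B replaces A's single branching elif loop by five independent filtering passes, one per
-- bucket (objective: alternative decomposition, same cost).

-- ===== PORT A =====
-- the module constant AXIOM_LIKE (a set of string literals; membership only, order irrelevant)
def pvAxiomLike : List String :=
  ["axiom", "hypothesis", "definition", "assumption", "lemma", "theorem",
   "corollary", "conjecture", "negated_conjecture"]

-- data["role"]: first-match lookup in the inner dict; Pre_ guarantees the key is present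
-- (Python raises KeyError when it is absent, so the "" default is never reached under Pre_).
def pvRole (d : List (String × String)) : String := (List.lookup "role" d).getD ""

-- the body of A's for-loop: one elif chain appending (name, data) to one of the five buckets
def pvStepA (pset : PySem.Set String)
    (st : (List (List (String × String))) × (List (List (String × String))) × (List (List (String × String))) × (List (List (String × String))) × (List (List (String × String))))
    (nd : String × List (String × String)) :
    (List (List (String × String))) × (List (List (String × String))) × (List (List (String × String))) × (List (List (String × String))) × (List (List (String × String))) :=
  let role := pvRole nd.2
  if ¬ (pvAxiomLike.contains role = true) then
    (st.1, st.2.1, st.2.2.1, st.2.2.2.1, st.2.2.2.2 ++ [nd.2])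
  else if role = "conjecture" then
    (st.1 ++ [nd.2], st.2.1, st.2.2.1, st.2.2.2.1, st.2.2.2.2)
  else if role = "negated_conjecture" then
    (st.1, st.2.1 ++ [nd.2], st.2.2.1, st.2.2.2.1, st.2.2.2.2)
  else if pset.contains nd.1 then
    (st.1, st.2.1, st.2.2.1 ++ [nd.2], st.2.2.2.1, st.2.2.2.2)
  else
    (st.1, st.2.1, st.2.2.1, st.2.2.2.1 ++ [nd.2], st.2.2.2.2)

def split_formulas (all_formulas : List (String × List (String × String))) (positive_axiom_names : List String) : (List (List (String × String))) × (List (List (String × String))) × (List (List (String × String))) × (List (List (String × String))) × (List (List (String × String))) :=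
  let pset : PySem.Set String := PySem.Set.ofList positive_axiom_names
  all_formulas.foldl (pvStepA pset) ([], [], [], [], [])

-- ===== PORT B =====
def split_formulas_alt (all_formulas : List (String × List (String × String))) (positive_axiom_names : List String) : (List (List (String × String))) × (List (List (String × String))) × (List (List (String × String))) × (List (List (String × String))) × (List (List (String × String))) :=
  let pset : PySem.Set String := PySem.Set.ofList positive_axiom_names
  ( (all_formulas.filter (fun nd => pvRole nd.2 == "conjecture")).map (·.2),
    (all_formulas.filter (fun nd => pvRole nd.2 == "negated_conjecture")).map (·.2),
    (all_formulas.filter (fun nd =>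
        pvAxiomLike.contains (pvRole nd.2)
        && !(pvRole nd.2 == "conjecture") && !(pvRole nd.2 == "negated_conjecture")
        && pset.contains nd.1)).map (·.2),
    (all_formulas.filter (fun nd =>
        pvAxiomLike.contains (pvRole nd.2)
        && !(pvRole nd.2 == "conjecture") && !(pvRole nd.2 == "negated_conjecture")
        && !(pset.contains nd.1))).map (·.2),
    (all_formulas.filter (fun nd => !(pvAxiomLike.contains (pvRole nd.2)))).map (·.2) )

-- ===== PRECONDITION & SPEC =====
-- Pre_ excludes inner dicts missing the "role" key (there Python raises KeyError) and lists
-- whose outer names are not pairwise distinct (such a list does not represent a Python dict,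
-- whose keys are unique, so neither behaviour is specified by A).
def Pre_split_formulas (all_formulas : List (String × List (String × String))) (positive_axiom_names : List String) : Prop :=
  (all_formulas.map Prod.fst).Nodup ∧
  all_formulas.all (fun nd => (List.lookup "role" nd.2).isSome) = true
instance (all_formulas : List (String × List (String × String))) (positive_axiom_names : List String) : Decidable (Pre_split_formulas all_formulas positive_axiom_names) := by unfold Pre_split_formulas; infer_instance

def pvWitness_split_formulas : (List (String × List (String × String))) × List String :=
  ([("a1", [("role", "axiom")]), ("c", [("role", "conjecture")]), ("p", [("role", "plain")])], ["a1"])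

def Spec_split_formulas (all_formulas : List (String × List (String × String))) (positive_axiom_names : List String) (out : (List (List (String × String))) × (List (List (String × String))) × (List (List (String × String))) × (List (List (String × String))) × (List (List (String × String)))) : Prop := out = split_formulas_alt all_formulas positive_axiom_names
instance (all_formulas : List (String × List (String × String))) (positive_axiom_names : List String) (out : (List (List (String × String))) × (List (List (String × String))) × (List (List (String × String))) × (List (List (String × String))) × (List (List (String × String)))) : Decidable (Spec_split_formulas all_formulas positive_axiom_names out) := by
  unfold Spec_split_formulas
  -- instance synthesis hits its pending-depth limit on the quintuple, so compose DecidableEq by hand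
  have h1 : DecidableEq (List (List (String × String))) := by infer_instance
  have h2 := @instDecidableEqProd _ _ h1 h1
  have h3 := @instDecidableEqProd _ _ h1 h2
  have h4 := @instDecidableEqProd _ _ h1 h3
  exact @instDecidableEqProd _ _ h1 h4 out (split_formulas_alt all_formulas positive_axiom_names)

-- ===== CLAIM (what is proved, stated in full; the proofs are below) =====
def Claim_equal_split_formulas : Prop := ∀ (all_formulas : List (String × List (String × String))) (positive_axiom_names : List String), Dom_split_formulas all_formulas positive_axiom_names → Pre_split_formulas all_formulas positive_axiom_names → Spec_split_formulas all_formulas positive_axiom_names (split_formulas all_formulas positive_axiom_names)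

-- ===== LEMMAS AND PROOFS =====

-- Invariant of A's fold: starting from accumulators (c, n, p, g, a) it appends exactly
-- B's five filtered lists.
theorem pv_fold_spec (pset : PySem.Set String) :
    ∀ (af : List (String × List (String × String)))
      (c n p g a : List (List (String × String))),
    af.foldl (pvStepA pset) (c, n, p, g, a)
    = ( c ++ (af.filter (fun nd => pvRole nd.2 == "conjecture")).map (·.2),
        n ++ (af.filter (fun nd => pvRole nd.2 == "negated_conjecture")).map (·.2),
        p ++ (af.filter (fun nd =>
            pvAxiomLike.contains (pvRole nd.2)
            && !(pvRole nd.2 == "conjecture") && !(pvRole nd.2 == "negated_conjecture")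
            && pset.contains nd.1)).map (·.2),
        g ++ (af.filter (fun nd =>
            pvAxiomLike.contains (pvRole nd.2)
            && !(pvRole nd.2 == "conjecture") && !(pvRole nd.2 == "negated_conjecture")
            && !(pset.contains nd.1))).map (·.2),
        a ++ (af.filter (fun nd => !(pvAxiomLike.contains (pvRole nd.2)))).map (·.2) ) := by
  intro af
  have hc : "conjecture" ∈ pvAxiomLike := by decide
  have hnc : "negated_conjecture" ∈ pvAxiomLike := by decide
  induction af with
  | nil => intro c n p g a; simp
  | cons hd tl ih =>
    intro c n p g a
    rw [List.foldl_cons]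
    by_cases h1 : pvRole hd.2 ∈ pvAxiomLike
    · by_cases h2 : pvRole hd.2 = "conjecture"
      · have hstep : pvStepA pset (c, n, p, g, a) hd = (c ++ [hd.2], n, p, g, a) := by
          simp [pvStepA, List.contains_eq_mem, h2, hc]
        rw [hstep, ih]
        simp [List.contains_eq_mem, h2, hc]
      · by_cases h3 : pvRole hd.2 = "negated_conjecture"
        · have hstep : pvStepA pset (c, n, p, g, a) hd = (c, n ++ [hd.2], p, g, a) := by
            simp [pvStepA, List.contains_eq_mem, h3, hnc]
          rw [hstep, ih]
          simp [List.contains_eq_mem, h3, hnc]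
        · by_cases h4 : hd.1 ∈ pset
          · have hstep : pvStepA pset (c, n, p, g, a) hd = (c, n, p ++ [hd.2], g, a) := by
              simp [pvStepA, List.contains_eq_mem, h1, h2, h3, h4, PySem.Set.contains]
            rw [hstep, ih]
            simp [List.contains_eq_mem, h1, h2, h3, h4, PySem.Set.contains]
          · have hstep : pvStepA pset (c, n, p, g, a) hd = (c, n, p, g ++ [hd.2], a) := by
              simp [pvStepA, List.contains_eq_mem, h1, h2, h3, h4, PySem.Set.contains]
            rw [hstep, ih]
            simp [List.contains_eq_mem, h1, h2, h3, h4, PySem.Set.contains]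
    · have h2 : pvRole hd.2 ≠ "conjecture" := fun h => h1 (h ▸ hc)
      have h3 : pvRole hd.2 ≠ "negated_conjecture" := fun h => h1 (h ▸ hnc)
      have hstep : pvStepA pset (c, n, p, g, a) hd = (c, n, p, g, a ++ [hd.2]) := by
        simp [pvStepA, List.contains_eq_mem, h1]
      rw [hstep, ih]
      simp [List.contains_eq_mem, h1, h2, h3]

-- ===== VERDICT (by name: the statement is the Claim_ definition above) =====
theorem split_formulas_spec : Claim_equal_split_formulas := by
  intro af pos _ _
  unfold Spec_split_formulas split_formulas split_formulas_alt
  simp only [pv_fold_spec, List.nil_append]
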